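-- pv_equiv track=rewrite | github.com/pypi-data/pypi-mirror-204 | packages/ib110hw/ib110hw-0.1.4.tar.gz/ib110hw-0.1.4/src/ib110hw/turing/_helpers.py | validate_dtm_transitions
-- ===== SOURCE A (Python) =====
-- from typing import TextIO, List, Tuple, Set, Optional
-- from itertools import takewhile, dropwhile
--
-- def validate_dtm_transitions(definition: List[str]) -> Optional[str]:
--     lines = list(dropwhile(lambda l: l != "---", definition))[1:]
--     get_part = lambda l, i: l.split("->")[i]
--     # checks the length of arguments on the left side
--     valid_current = lambda l: len(get_part(l, 0).split()) == 2
--     # checks the length of the read symbol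
--     valid_read = lambda l: len(get_part(l, 0).split()[1]) == 1
--     # checks the length of arguments on the right side
--     valid_next = lambda l: len(get_part(l, 1).split()) == 3
--     # checks the length of the write symbol
--     valid_write = lambda l: len(get_part(l, 1).split()[1]) == 1
--     # checks the direction
--     valid_dir = lambda l: get_part(l, 1).split()[-1] in ["L", "R", "S"]
--
--     rule = next((l for l in lines if "->" not in l), None)
--     if rule:
--         return f"Missing arrow in rule:\n{rule}."
--
--     rule = next((l for l in lines if not valid_current(l)), None)
--     if rule:
--         return f"Invalid combination of state and read symbol in rule:\n{rule}"
--
--     rule = next((l for l in lines if not valid_read(l)), None)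
--     if rule:
--         return f"Invalid read symbol length (> 1) in rule\n{rule}"
--
--     rule = next((l for l in lines if not valid_next(l)), None)
--     if rule:
--         return f"The next state, write symbol or direction is missing in rule:\n{rule}"
--
--     rule = next((l for l in lines if not valid_write(l)), None)
--     if rule:
--         return f"Invalid write symbol length (> 1) in rule\n{rule}"
--
--     rule = next((l for l in lines if not valid_dir(l)), None)
--     if rule:
--         return f"Invalid direction in rule:\n{rule}"
-- ===== SOURCE B (Python) =====
-- from itertools import dropwhile
--
-- _MSG = [
--     "Missing arrow in rule:\n{}.",
--     "Invalid combination of state and read symbol in rule:\n{}",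
--     "Invalid read symbol length (> 1) in rule\n{}",
--     "The next state, write symbol or direction is missing in rule:\n{}",
--     "Invalid write symbol length (> 1) in rule\n{}",
--     "Invalid direction in rule:\n{}",
-- ]
--
--
-- def _first_fail(line):
--     """Index of the first (highest-priority) check this rule line fails, or None."""
--     if "->" not in line:
--         return 0
--     left = line.split("->")[0].split()
--     if len(left) != 2:
--         return 1
--     if len(left[1]) != 1:
--         return 2
--     right = line.split("->")[1].split()
--     if len(right) != 3:
--         return 3
--     if len(right[1]) != 1:
--         return 4
--     if right[-1] not in ("L", "R", "S"):
--         return 5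
--     return None
--
--
-- def validate_dtm_transitions(definition):
--     lines = list(dropwhile(lambda l: l != "---", definition))[1:]
--     best = None  # (check index, first line failing it)
--     for line in lines:
--         k = _first_fail(line)
--         if k is not None and (best is None or k < best[0]):
--             best = (k, line)
--     if best is None:
--         return None
--     return _MSG[best[0]].format(best[1])
-- ===== Notes on version B (the rewrite author's own statement) =====
-- stated objective: alternative
-- what changed: A makes six separate whole-list scans (one per check, in priority order); B makes a single pass that computes each line's first failing check and keeps the lowest-priority-index check together with its first offending line, then emits that check's message.
-- outside the precondition, e.g. on validate_dtm_transitions(['---', '', 'a->b']): A raises IndexError, B returns 'Missing arrow in rule:\n.'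
import Mathlib
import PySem

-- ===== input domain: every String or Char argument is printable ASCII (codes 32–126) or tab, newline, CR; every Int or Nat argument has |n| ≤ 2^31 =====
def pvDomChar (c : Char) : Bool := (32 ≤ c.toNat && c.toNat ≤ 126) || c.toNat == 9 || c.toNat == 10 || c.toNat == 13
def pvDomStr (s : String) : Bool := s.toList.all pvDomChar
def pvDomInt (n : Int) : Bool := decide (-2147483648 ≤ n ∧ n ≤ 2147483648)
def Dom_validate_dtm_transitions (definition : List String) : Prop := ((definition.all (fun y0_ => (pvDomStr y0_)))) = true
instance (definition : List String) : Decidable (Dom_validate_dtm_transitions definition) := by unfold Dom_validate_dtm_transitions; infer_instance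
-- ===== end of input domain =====

-- B replaces A's six whole-list scans by one pass that tracks the highest-priority
-- failing check (and its first offending line); objective: alternative single-pass structure.

-- ===== PORT A =====
-- get_part = lambda l, i: l.split("->")[i]   (the .getD defaults are only reached where Python raises, outside Pre_)
def pvGetPart (l : String) (i : Int) : String :=
  (PySem.List.pyGet? ((PySem.Str.split? l "->").getD []) i).getD ""

def pvValidCurrent (l : String) : Bool := (PySem.Str.split₀ (pvGetPart l 0)).length == 2
def pvValidRead (l : String) : Bool :=
  PySem.Str.len ((PySem.List.pyGet? (PySem.Str.split₀ (pvGetPart l 0)) 1).getD "") == 1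
def pvValidNext (l : String) : Bool := (PySem.Str.split₀ (pvGetPart l 1)).length == 3
def pvValidWrite (l : String) : Bool :=
  PySem.Str.len ((PySem.List.pyGet? (PySem.Str.split₀ (pvGetPart l 1)) 1).getD "") == 1
def pvValidDir (l : String) : Bool :=
  ["L", "R", "S"].contains ((PySem.List.pyGet? (PySem.Str.split₀ (pvGetPart l 1)) (-1)).getD "")

-- the six sequential `rule = next(...); if rule: return ...` blocks, each falling through to the next
def pvPass5 (lines : List String) : Option String :=
  match lines.find? (fun l => !(pvValidDir l)) with
  | some r => if r != "" then some ("Invalid direction in rule:\n" ++ r) else none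
  | none => none

def pvPass4 (lines : List String) : Option String :=
  match lines.find? (fun l => !(pvValidWrite l)) with
  | some r => if r != "" then some ("Invalid write symbol length (> 1) in rule\n" ++ r) else pvPass5 lines
  | none => pvPass5 lines

def pvPass3 (lines : List String) : Option String :=
  match lines.find? (fun l => !(pvValidNext l)) with
  | some r => if r != "" then some ("The next state, write symbol or direction is missing in rule:\n" ++ r) else pvPass4 lines
  | none => pvPass4 lines

def pvPass2 (lines : List String) : Option String :=
  match lines.find? (fun l => !(pvValidRead l)) with
  | some r => if r != "" then some ("Invalid read symbol length (> 1) in rule\n" ++ r) else pvPass3 lines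
  | none => pvPass3 lines

def pvPass1 (lines : List String) : Option String :=
  match lines.find? (fun l => !(pvValidCurrent l)) with
  | some r => if r != "" then some ("Invalid combination of state and read symbol in rule:\n" ++ r) else pvPass2 lines
  | none => pvPass2 lines

def validate_dtm_transitions (definition : List String) : Option String :=
  let lines := (definition.dropWhile (fun l => l != "---")).drop 1
  match lines.find? (fun l => !(PySem.Str.isIn "->" l)) with
  | some r => if r != "" then some ("Missing arrow in rule:\n" ++ r ++ ".") else pvPass1 lines
  | none => pvPass1 lines

-- ===== PORT B =====
-- _msg(k, rule)
def pvMsg (k : Nat) (r : String) : String :=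
  match k with
  | 0 => "Missing arrow in rule:\n" ++ r ++ "."
  | 1 => "Invalid combination of state and read symbol in rule:\n" ++ r
  | 2 => "Invalid read symbol length (> 1) in rule\n" ++ r
  | 3 => "The next state, write symbol or direction is missing in rule:\n" ++ r
  | 4 => "Invalid write symbol length (> 1) in rule\n" ++ r
  | _ => "Invalid direction in rule:\n" ++ r

-- _first_fail(line): index of the first check the line fails, or none
def pvFirstFail (l : String) : Option Nat :=
  if !(PySem.Str.isIn "->" l) then some 0
  else
    let left := PySem.Str.split₀ ((PySem.List.pyGet? ((PySem.Str.split? l "->").getD []) 0).getD "")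
    if left.length != 2 then some 1
    else if PySem.Str.len ((PySem.List.pyGet? left 1).getD "") != 1 then some 2
    else
      let right := PySem.Str.split₀ ((PySem.List.pyGet? ((PySem.Str.split? l "->").getD []) 1).getD "")
      if right.length != 3 then some 3
      else if PySem.Str.len ((PySem.List.pyGet? right 1).getD "") != 1 then some 4
      else if !(["L", "R", "S"].contains ((PySem.List.pyGet? right (-1)).getD "")) then some 5
      else none

-- the loop body: keep the best (lowest check index, earliest line) seen so far
def pvStep (best : Option (Nat × String)) (l : String) : Option (Nat × String) :=
  match pvFirstFail l with
  | none => best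
  | some k =>
    match best with
    | none => some (k, l)
    | some (bk, br) => if k < bk then some (k, l) else some (bk, br)

def validate_dtm_transitions_alt (definition : List String) : Option String :=
  let lines := (definition.dropWhile (fun l => l != "---")).drop 1
  match lines.foldl pvStep none with
  | none => none
  | some (k, r) => some (pvMsg k r)

-- ===== PRECONDITION & SPEC =====
-- Pre_ excludes inputs whose rule section contains an empty line: there Python A either raises
-- IndexError or silently skips checks on that line (`if rule:` is false for ""), an accidental
-- truthiness corner on which B's uniform per-line checking is as defensible as A's skipping.
def Pre_validate_dtm_transitions (definition : List String) : Prop :=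
  "" ∉ (definition.dropWhile (fun l => l != "---")).drop 1
instance (definition : List String) : Decidable (Pre_validate_dtm_transitions definition) := by unfold Pre_validate_dtm_transitions; infer_instance

def pvWitness_validate_dtm_transitions : List String := ["---", "a b -> c d L"]

def Spec_validate_dtm_transitions (definition : List String) (out : Option String) : Prop := out = validate_dtm_transitions_alt definition
instance (definition : List String) (out : Option String) : Decidable (Spec_validate_dtm_transitions definition out) := by unfold Spec_validate_dtm_transitions; infer_instance

-- ===== CLAIM (what is proved, stated in full; the proofs are below) =====
def Claim_equal_validate_dtm_transitions : Prop := ∀ (definition : List String), Dom_validate_dtm_transitions definition → Pre_validate_dtm_transitions definition → Spec_validate_dtm_transitions definition (validate_dtm_transitions definition)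

-- ===== LEMMAS AND PROOFS =====

-- A's six check predicates, indexed by pass number (≥ 6 is unused)
def pvPredOf (j : Nat) (l : String) : Bool :=
  match j with
  | 0 => PySem.Str.isIn "->" l
  | 1 => pvValidCurrent l
  | 2 => pvValidRead l
  | 3 => pvValidNext l
  | 4 => pvValidWrite l
  | 5 => pvValidDir l
  | _ => true

lemma ff_eq (l : String) : pvFirstFail l =
    if !(pvPredOf 0 l) then some 0
    else if !(pvPredOf 1 l) then some 1
    else if !(pvPredOf 2 l) then some 2
    else if !(pvPredOf 3 l) then some 3
    else if !(pvPredOf 4 l) then some 4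
    else if !(pvPredOf 5 l) then some 5
    else none := rfl

lemma ff_some_pred (a : String) (j : Nat) (h : pvFirstFail a = some j) : pvPredOf j a = false := by
  rw [ff_eq] at h
  split_ifs at h with c0 c1 c2 c3 c4 c5 <;> simp_all

lemma ff_of_preds (l : String) (k : Nat) (hk : k ≤ 5)
    (hlt : ∀ j, j < k → pvPredOf j l = true) (hfail : pvPredOf k l = false) :
    pvFirstFail l = some k := by
  rw [ff_eq]
  interval_cases k
  · simp [hfail]
  · simp [hlt 0 (by omega), hfail]
  · simp [hlt 0 (by omega), hlt 1 (by omega), hfail]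
  · simp [hlt 0 (by omega), hlt 1 (by omega), hlt 2 (by omega), hfail]
  · simp [hlt 0 (by omega), hlt 1 (by omega), hlt 2 (by omega), hlt 3 (by omega), hfail]
  · simp [hlt 0 (by omega), hlt 1 (by omega), hlt 2 (by omega), hlt 3 (by omega), hlt 4 (by omega), hfail]

lemma ff_none_of_preds (l : String) (h : ∀ j, j ≤ 5 → pvPredOf j l = true) :
    pvFirstFail l = none := by
  rw [ff_eq]
  simp [h 0 (by omega), h 1 (by omega), h 2 (by omega), h 3 (by omega), h 4 (by omega), h 5 (by omega)]

lemma fold_const (ls : List String) (b : Option (Nat × String))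
    (h : ∀ l ∈ ls, pvFirstFail l = none) : ls.foldl pvStep b = b := by
  induction ls generalizing b with
  | nil => rfl
  | cons x xs ih =>
    have hx := h x (by simp)
    simp only [List.foldl_cons, pvStep, hx]
    exact ih b (fun l hl => h l (by simp [hl]))

lemma fold_keep (ls : List String) (k : Nat) (r : String)
    (h : ∀ l ∈ ls, ∀ j, pvFirstFail l = some j → k ≤ j) :
    ls.foldl pvStep (some (k, r)) = some (k, r) := by
  induction ls with
  | nil => rfl
  | cons x xs ih =>
    simp only [List.foldl_cons]
    have hx : pvStep (some (k, r)) x = some (k, r) := by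
      unfold pvStep
      cases hf : pvFirstFail x with
      | none => rfl
      | some j =>
        have := h x (by simp) j hf
        simp [Nat.not_lt.mpr this]
    rw [hx]
    exact ih (fun l hl j hj => h l (by simp [hl]) j hj)

lemma fold_ge (ls : List String) (k : Nat) (b : Option (Nat × String))
    (hb : b = none ∨ ∃ j s, k < j ∧ b = some (j, s))
    (h : ∀ l ∈ ls, ∀ j, pvFirstFail l = some j → k < j) :
    ls.foldl pvStep b = none ∨ ∃ j s, k < j ∧ ls.foldl pvStep b = some (j, s) := by
  induction ls generalizing b with
  | nil => simpa using hb
  | cons x xs ih =>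
    simp only [List.foldl_cons]
    apply ih
    · cases hf : pvFirstFail x with
      | none =>
        simp only [pvStep, hf]
        exact hb
      | some j =>
        have hkj := h x (by simp) j hf
        rcases hb with rfl | ⟨j', s', hkj', rfl⟩
        · exact Or.inr ⟨j, x, hkj, by simp [pvStep, hf]⟩
        · by_cases hlt : j < j'
          · exact Or.inr ⟨j, x, hkj, by simp [pvStep, hf, hlt]⟩
          · exact Or.inr ⟨j', s', hkj', by simp [pvStep, hf, hlt]⟩
    · exact fun l hl j hj => h l (by simp [hl]) j hj

lemma fold_stage (as bs : List String) (r : String) (k : Nat)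
    (hr : pvFirstFail r = some k)
    (has : ∀ l ∈ as, ∀ j, pvFirstFail l = some j → k < j)
    (hbs : ∀ l ∈ bs, ∀ j, pvFirstFail l = some j → k ≤ j) :
    (as ++ r :: bs).foldl pvStep none = some (k, r) := by
  rw [List.foldl_append, List.foldl_cons]
  rcases fold_ge as k none (Or.inl rfl) has with h | ⟨j, s, hkj, h⟩ <;> rw [h]
  · rw [show pvStep none r = some (k, r) by simp [pvStep, hr]]
    exact fold_keep bs k r hbs
  · rw [show pvStep (some (j, s)) r = some (k, r) by simp [pvStep, hr, hkj]]
    exact fold_keep bs k r hbs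

-- the main per-stage lemma: if every line passes all checks below k and r is the first line
-- failing check k, then B's single pass lands on (k, r)
lemma stage_lemma (L : List String) (k : Nat) (hk : k ≤ 5) (r : String)
    (Hlt : ∀ l ∈ L, ∀ j, j < k → pvPredOf j l = true)
    (hfind : L.find? (fun l => !(pvPredOf k l)) = some r) :
    L.foldl pvStep none = some (k, r) := by
  rcases List.find?_eq_some_iff_append.mp hfind with ⟨hpr, as, bs, rfl, hpre⟩
  have hfr : pvFirstFail r = some k :=
    ff_of_preds r k hk (fun j hj => Hlt r (by simp) j hj) (by simpa using hpr)
  refine fold_stage as bs r k hfr ?_ ?_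
  · intro l hl j hj
    have hmem : l ∈ as ++ r :: bs := by simp [hl]
    have hjp := ff_some_pred l j hj
    by_contra hc
    have hjk : j ≤ k := by omega
    rcases Nat.lt_or_ge j k with hlt | hge
    · exact absurd (Hlt l hmem j hlt) (by simp [hjp])
    · have : j = k := by omega
      subst this
      have := hpre l hl
      simp only [Bool.not_not] at this
      exact absurd this (by simp [hjp])
  · intro l hl j hj
    have hmem : l ∈ as ++ r :: bs := by simp [hl]
    have hjp := ff_some_pred l j hj
    by_contra hc
    exact absurd (Hlt l hmem j (by omega)) (by simp [hjp])

lemma find?_none_pred (L : List String) (p : String → Bool)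
    (h : L.find? (fun l => !(p l)) = none) : ∀ l ∈ L, p l = true := by
  intro l hl
  have := List.find?_eq_none.mp h l hl
  simpa using this

lemma ne_empty_bne (r : String) (h : r ≠ "") : (r != "") = true := by
  simp [bne, h]

-- ===== VERDICT (by name: the statement is the Claim_ definition above) =====
theorem validate_dtm_transitions_spec : Claim_equal_validate_dtm_transitions := by
  intro definition _hdom hpre
  unfold Pre_validate_dtm_transitions at hpre
  unfold Spec_validate_dtm_transitions
  simp only [validate_dtm_transitions, validate_dtm_transitions_alt]
  set L := (definition.dropWhile (fun l => l != "---")).drop 1 with hL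
  have hne : ∀ l ∈ L, l ≠ "" := by
    intro l hl hcon
    exact hpre (hcon ▸ hl)
  -- stage 0
  cases h0 : L.find? (fun l => !(PySem.Str.isIn "->" l)) with
  | some r =>
    have hmem := List.mem_of_find?_eq_some h0
    simp only []
    rw [if_pos (ne_empty_bne r (hne r hmem))]
    have : L.foldl pvStep none = some (0, r) :=
      stage_lemma L 0 (by omega) r (by intro l _ j hj; omega) h0
    rw [this]
    rfl
  | none =>
    have H0 : ∀ l ∈ L, pvPredOf 0 l = true := find?_none_pred L _ h0
    simp only []
    unfold pvPass1
    cases h1 : L.find? (fun l => !(pvValidCurrent l)) with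
    | some r =>
      have hmem := List.mem_of_find?_eq_some h1
      simp only []
      rw [if_pos (ne_empty_bne r (hne r hmem))]
      have : L.foldl pvStep none = some (1, r) := by
        refine stage_lemma L 1 (by omega) r ?_ h1
        intro l hl j hj
        interval_cases j
        exact H0 l hl
      rw [this]
      rfl
    | none =>
      have H1 : ∀ l ∈ L, pvPredOf 1 l = true := find?_none_pred L _ h1
      simp only []
      unfold pvPass2
      cases h2 : L.find? (fun l => !(pvValidRead l)) with
      | some r =>
        have hmem := List.mem_of_find?_eq_some h2
        simp only []
        rw [if_pos (ne_empty_bne r (hne r hmem))]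
        have : L.foldl pvStep none = some (2, r) := by
          refine stage_lemma L 2 (by omega) r ?_ h2
          intro l hl j hj
          interval_cases j
          · exact H0 l hl
          · exact H1 l hl
        rw [this]
        rfl
      | none =>
        have H2 : ∀ l ∈ L, pvPredOf 2 l = true := find?_none_pred L _ h2
        simp only []
        unfold pvPass3
        cases h3 : L.find? (fun l => !(pvValidNext l)) with
        | some r =>
          have hmem := List.mem_of_find?_eq_some h3
          simp only []
          rw [if_pos (ne_empty_bne r (hne r hmem))]
          have : L.foldl pvStep none = some (3, r) := by
            refine stage_lemma L 3 (by omega) r ?_ h3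
            intro l hl j hj
            interval_cases j
            · exact H0 l hl
            · exact H1 l hl
            · exact H2 l hl
          rw [this]
          rfl
        | none =>
          have H3 : ∀ l ∈ L, pvPredOf 3 l = true := find?_none_pred L _ h3
          simp only []
          unfold pvPass4
          cases h4 : L.find? (fun l => !(pvValidWrite l)) with
          | some r =>
            have hmem := List.mem_of_find?_eq_some h4
            simp only []
            rw [if_pos (ne_empty_bne r (hne r hmem))]
            have : L.foldl pvStep none = some (4, r) := by
              refine stage_lemma L 4 (by omega) r ?_ h4
              intro l hl j hj
              interval_cases j
              · exact H0 l hl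
              · exact H1 l hl
              · exact H2 l hl
              · exact H3 l hl
            rw [this]
            rfl
          | none =>
            have H4 : ∀ l ∈ L, pvPredOf 4 l = true := find?_none_pred L _ h4
            simp only []
            unfold pvPass5
            cases h5 : L.find? (fun l => !(pvValidDir l)) with
            | some r =>
              have hmem := List.mem_of_find?_eq_some h5
              simp only []
              rw [if_pos (ne_empty_bne r (hne r hmem))]
              have : L.foldl pvStep none = some (5, r) := by
                refine stage_lemma L 5 (by omega) r ?_ h5
                intro l hl j hj
                interval_cases j
                · exact H0 l hl
                · exact H1 l hl
                · exact H2 l hl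
                · exact H3 l hl
                · exact H4 l hl
              rw [this]
              rfl
            | none =>
              have H5 : ∀ l ∈ L, pvPredOf 5 l = true := find?_none_pred L _ h5
              have : L.foldl pvStep none = none := by
                refine fold_const L none ?_
                intro l hl
                refine ff_none_of_preds l ?_
                intro j hj
                interval_cases j
                · exact H0 l hl
                · exact H1 l hl
                · exact H2 l hl
                · exact H3 l hl
                · exact H4 l hl
                · exact H5 l hl
              rw [this]
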